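-- pv_equiv track=rewrite | github.com/nayanjaiswalgit/db-backup-ui | backend/app/core/validation.py | sanitize_shell_arg
-- ===== SOURCE A (Python) =====
-- def sanitize_shell_arg(arg: str) -> str:
--     """
--     Sanitize argument for shell command execution.
--     Use with caution - prefer parameterized commands when possible.
--     """
--     if not arg:
--         return ""
--
--     # Remove dangerous characters
--     dangerous_chars = [';', '|', '&', '$', '`', '\n', '\r', '>', '<', '(', ')', '{', '}']
--     sanitized = arg
--     for char in dangerous_chars:
--         sanitized = sanitized.replace(char, '')
--
--     # Escape single quotes
--     sanitized = sanitized.replace("'", "'\\''")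
--
--     return sanitized
-- ===== SOURCE B (Python) =====
-- def sanitize_shell_arg(arg: str) -> str:
--     """Single-pass sanitizer: drop dangerous chars, escape single quotes."""
--     if not arg:
--         return ""
--     dangerous = {';', '|', '&', '$', '`', '\n', '\r', '>', '<', '(', ')', '{', '}'}
--     return ''.join(
--         '' if c in dangerous else ("'\\''" if c == "'" else c)
--         for c in arg
--     )
-- ===== Notes on version B (the rewrite author's own statement) =====
-- stated objective: alternative
-- what changed: Replaces A's 14 sequential whole-string .replace passes with a single per-character scan that drops dangerous characters, expands single quotes and keeps the rest; it trades CPython's C-level .replace loops for one Python-level pass.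
import Mathlib
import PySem

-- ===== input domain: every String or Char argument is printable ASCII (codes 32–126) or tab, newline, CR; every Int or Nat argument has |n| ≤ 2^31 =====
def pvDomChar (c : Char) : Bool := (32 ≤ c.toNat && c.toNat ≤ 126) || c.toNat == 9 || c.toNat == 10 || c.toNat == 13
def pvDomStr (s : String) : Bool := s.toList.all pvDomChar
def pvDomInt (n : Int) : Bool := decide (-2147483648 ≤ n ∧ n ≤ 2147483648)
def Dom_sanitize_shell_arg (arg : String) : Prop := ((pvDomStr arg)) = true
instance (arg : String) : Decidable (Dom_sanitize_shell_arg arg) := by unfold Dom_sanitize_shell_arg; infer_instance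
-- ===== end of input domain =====

-- B replaces A's 14 sequential whole-string .replace passes with one single scan over the input.

-- ===== PORT A =====
-- literal transliteration: guard, then a loop of .replace(char, '') over the
-- dangerous-character list, then .replace("'", "'\\''")
def sanitize_shell_arg (arg : String) : String :=
  if arg = "" then ""
  else
    let dangerous_chars : List String :=
      [";", "|", "&", "$", "`", "\n", "\r", ">", "<", "(", ")", "{", "}"]
    let sanitized := dangerous_chars.foldl (fun s ch => PySem.Str.replace s ch "") arg
    PySem.Str.replace sanitized "'" "'\\''"

-- ===== PORT B =====
-- the Python set of dangerous characters
def dangerousSet : PySem.Set Char :=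
  PySem.Set.ofList [';', '|', '&', '$', '`', '\n', '\r', '>', '<', '(', ')', '{', '}']

-- single pass: drop dangerous chars, expand single quotes, keep the rest; join
def sanitize_shell_arg_alt (arg : String) : String :=
  if arg = "" then ""
  else
    String.ofList (arg.toList.flatMap (fun c =>
      if PySem.Set.contains dangerousSet c then []
      else if c = '\'' then "'\\''".toList
      else [c]))

-- ===== PRECONDITION & SPEC =====
def Spec_sanitize_shell_arg (arg : String) (out : String) : Prop := out = sanitize_shell_arg_alt arg
instance (arg : String) (out : String) : Decidable (Spec_sanitize_shell_arg arg out) := by unfold Spec_sanitize_shell_arg; infer_instance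

-- ===== CLAIM (what is proved, stated in full; the proofs are below) =====
def Claim_equal_sanitize_shell_arg : Prop := ∀ (arg : String), Dom_sanitize_shell_arg arg → Spec_sanitize_shell_arg arg (sanitize_shell_arg arg)

-- ===== LEMMAS AND PROOFS =====

-- replace.go with a single-character pattern acts character by character
theorem go_single (d : Char) (new : List Char) :
    ∀ (fuel : Nat) (l acc : List Char), l.length ≤ fuel →
      PySem.Chars.replace.go [d] new fuel l acc
        = acc.reverse ++ l.flatMap (fun c => if c = d then new else [c]) := by
  intro fuel
  induction fuel with
  | zero =>
    intro l acc h
    have : l = [] := List.eq_nil_of_length_eq_zero (Nat.le_zero.mp h)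
    subst this
    simp [PySem.Chars.replace.go]
  | succ n ih =>
    intro l acc h
    cases l with
    | nil => simp [PySem.Chars.replace.go]
    | cons c t =>
      have ht : t.length ≤ n := by simp at h; omega
      by_cases hc : c = d
      · subst hc
        have hp : [c].isPrefixOf (c :: t) = true := by simp [List.isPrefixOf]
        simp only [PySem.Chars.replace.go, hp, if_pos]
        rw [ih _ _ (by simpa using ht)]
        simp
      · have hp : [d].isPrefixOf (c :: t) = false := by
          simp [List.isPrefixOf]; exact fun h' => hc h'.symm
        simp only [PySem.Chars.replace.go, hp]
        rw [ih _ _ ht]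
        simp [hc]

-- Python's s.replace(d, new) for a one-character pattern d is a per-character flatMap
theorem replace_single (l : List Char) (d : Char) (new : List Char) :
    PySem.Chars.replace l [d] new = l.flatMap (fun c => if c = d then new else [c]) := by
  rw [PySem.Chars.replace]
  simp only [List.isEmpty_cons, Bool.false_eq_true, if_false]
  simpa using go_single d new l.length l [] le_rfl

theorem sanitize_eq (arg : String) :
    sanitize_shell_arg arg = sanitize_shell_arg_alt arg := by
  by_cases h : arg = ""
  · simp [sanitize_shell_arg, sanitize_shell_arg_alt, h]
  · simp only [sanitize_shell_arg, sanitize_shell_arg_alt, h, if_false]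
    simp only [List.foldl_cons, List.foldl_nil, PySem.Str.replace, String.toList_ofList]
    simp only [show (";" : String).toList = [';'] from rfl,
      show ("|" : String).toList = ['|'] from rfl,
      show ("&" : String).toList = ['&'] from rfl,
      show ("$" : String).toList = ['$'] from rfl,
      show ("`" : String).toList = ['`'] from rfl,
      show ("\n" : String).toList = ['\n'] from rfl,
      show ("\r" : String).toList = ['\r'] from rfl,
      show (">" : String).toList = ['>'] from rfl,
      show ("<" : String).toList = ['<'] from rfl,
      show ("(" : String).toList = ['('] from rfl,
      show (")" : String).toList = [')'] from rfl,
      show ("{" : String).toList = ['{'] from rfl,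
      show ("}" : String).toList = ['}'] from rfl,
      show ("'" : String).toList = ['\''] from rfl,
      show ("" : String).toList = [] from rfl,
      show ("'\\''" : String).toList = ['\'','\\','\'','\''] from rfl]
    rw [replace_single, replace_single, replace_single, replace_single, replace_single,
        replace_single, replace_single, replace_single, replace_single, replace_single,
        replace_single, replace_single, replace_single, replace_single]
    simp only [List.flatMap_assoc]
    congr 1
    congr 1
    funext c
    by_cases hd : List.contains [';', '|', '&', '$', '`', '\n', '\r', '>', '<', '(', ')', '{', '}'] c
    · have hm : c ∈ ([';', '|', '&', '$', '`', '\n', '\r', '>', '<', '(', ')', '{', '}'] : List Char) := by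
        simpa using hd
      fin_cases hm <;> rfl
    · simp only [List.contains_eq_mem, List.mem_cons, List.not_mem_nil, or_false,
        decide_eq_true_eq] at hd
      rw [not_or] at hd
      obtain ⟨h1, hd⟩ := hd; rw [not_or] at hd
      obtain ⟨h2, hd⟩ := hd; rw [not_or] at hd
      obtain ⟨h3, hd⟩ := hd; rw [not_or] at hd
      obtain ⟨h4, hd⟩ := hd; rw [not_or] at hd
      obtain ⟨h5, hd⟩ := hd; rw [not_or] at hd
      obtain ⟨h6, hd⟩ := hd; rw [not_or] at hd
      obtain ⟨h7, hd⟩ := hd; rw [not_or] at hd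
      obtain ⟨h8, hd⟩ := hd; rw [not_or] at hd
      obtain ⟨h9, hd⟩ := hd; rw [not_or] at hd
      obtain ⟨h10, hd⟩ := hd; rw [not_or] at hd
      obtain ⟨h11, hd⟩ := hd; rw [not_or] at hd
      obtain ⟨h12, h13⟩ := hd
      simp [dangerousSet, PySem.Set.contains, PySem.Set.ofList,
        h1, h2, h3, h4, h5, h6, h7, h8, h9, h10, h11, h12, h13]

-- ===== VERDICT (by name: the statement is the Claim_ definition above) =====
set_option maxRecDepth 4096 in
theorem sanitize_shell_arg_spec : Claim_equal_sanitize_shell_arg := by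
  intro arg _
  unfold Spec_sanitize_shell_arg
  exact sanitize_eq arg
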